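-- pv_equiv track=rewrite | github.com/pypi-data/pypi-mirror-123 | packages/seacorenlp/seacorenlp-0.0.2.tar.gz/seacorenlp-0.0.2/seacorenlp/tagging/ner/custom_tagger.py | _to_bio_format
-- ===== SOURCE A (Python) =====
-- from typing import List, Tuple
--
-- def _to_bio_format(
--     predictions: List[Tuple[str, str]]
-- ) -> List[Tuple[str, str]]:
--     reformatted = []
--     if len(predictions) > 0:
--         for i, (token, entity) in enumerate(predictions):
--             reformatted_entity = "O"
--
--             if entity != "OTHER":
--                 prefix = "B"
--                 # use naive solution, though this may be wrong
--                 if i > 0 and predictions[i - 1][1] == entity: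
--                     prefix = "I"
--
--                 reformatted_entity = f"{prefix}-{entity.upper()}"
--
--             reformatted.append((token, reformatted_entity))
--
--     return reformatted
-- ===== SOURCE B (Python) =====
-- from typing import List, Tuple
--
-- def _to_bio_format(
--     predictions: List[Tuple[str, str]]
-- ) -> List[Tuple[str, str]]:
--     # Two-pointer grouping into maximal runs of equal entity, then tag each run.
--     out = []
--     i = 0
--     n = len(predictions)
--     while i < n:
--         entity = predictions[i][1]
--         j = i
--         while j < n and predictions[j][1] == entity:
--             j += 1
--         if entity == "OTHER":
--             out.extend((tok, "O") for tok, _ in predictions[i:j])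
--         else:
--             up = entity.upper()
--             out.append((predictions[i][0], "B-" + up))
--             out.extend((tok, "I-" + up) for tok, _ in predictions[i + 1:j])
--         i = j
--     return out
-- ===== Notes on version B (the rewrite author's own statement) =====
-- stated objective: alternative
-- what changed: B groups the predictions into maximal runs of equal entity with a two-pointer scan and tags each run as a whole (B- head, I- rest, or all O), instead of A's per-index check against predictions[i-1].
import Mathlib
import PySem

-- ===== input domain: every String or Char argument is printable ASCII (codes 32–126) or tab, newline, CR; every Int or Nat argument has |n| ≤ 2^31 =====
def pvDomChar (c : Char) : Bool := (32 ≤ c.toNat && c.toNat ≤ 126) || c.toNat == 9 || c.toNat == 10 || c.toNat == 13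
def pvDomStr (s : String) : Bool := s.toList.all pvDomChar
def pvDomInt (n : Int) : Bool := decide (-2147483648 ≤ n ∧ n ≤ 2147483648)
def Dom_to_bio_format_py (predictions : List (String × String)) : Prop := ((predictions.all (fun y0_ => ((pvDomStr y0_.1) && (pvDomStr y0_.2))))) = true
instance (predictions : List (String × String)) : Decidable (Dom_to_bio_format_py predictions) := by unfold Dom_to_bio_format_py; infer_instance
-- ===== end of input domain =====

-- B tags maximal runs of equal entity via a two-pointer grouping instead of A's per-index previous-element check; alternative decomposition, same O(n) cost.


-- ===== PORT A =====
def to_bio_format_py (predictions : List (String × String)) : List (String × String) :=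
  if predictions.length > 0 then
    (PySem.List.enumerate predictions 0).foldl
      (fun reformatted x =>
        reformatted ++
          [(x.2.1,
            if x.2.2 ≠ "OTHER" then
              (if x.1 > 0 ∧ (PySem.List.pyGet? predictions (x.1 - 1)).map Prod.snd = some x.2.2
                then "I" else "B") ++ "-" ++ PySem.Str.upper x.2.2
            else "O")]) []
  else []

-- ===== PORT B =====
-- inner while loop of Source B: collect the leading run of tokens whose entity equals e, return (run tokens, rest)
def pvTakeRun (e : String) : List (String × String) → List String × List (String × String)
  | [] => ([], [])
  | (t, e') :: rest =>
    if e' = e then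
      let p := pvTakeRun e rest
      (t :: p.1, p.2)
    else ([], (t, e') :: rest)

theorem pvTakeRun_length_le (e : String) (l : List (String × String)) :
    (pvTakeRun e l).2.length ≤ l.length := by
  induction l with
  | nil => simp [pvTakeRun]
  | cons x rest ih =>
    obtain ⟨t, e'⟩ := x
    by_cases h : e' = e <;> simp [pvTakeRun, h] <;> omega

-- outer while loop of Source B: the maximal runs, as (entity, tokens) pairs
def pvGroups : List (String × String) → List (String × List String)
  | [] => []
  | (t, e) :: rest =>
    (e, t :: (pvTakeRun e rest).1) :: pvGroups (pvTakeRun e rest).2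
  termination_by l => l.length
  decreasing_by
    have := pvTakeRun_length_le e rest
    simp
    omega

-- tagging of one run (the if/else body of Source B's outer loop)
def pvRender (g : String × List String) : List (String × String) :=
  if g.1 = "OTHER" then g.2.map (fun t => (t, "O"))
  else
    match g.2 with
    | [] => []
    | t :: ts =>
      (t, "B-" ++ PySem.Str.upper g.1) :: ts.map (fun t' => (t', "I-" ++ PySem.Str.upper g.1))

def to_bio_format_py_alt (predictions : List (String × String)) : List (String × String) :=
  (pvGroups predictions).flatMap pvRender

-- ===== PRECONDITION & SPEC =====
def Spec_to_bio_format_py (predictions : List (String × String)) (out : List (String × String)) : Prop := out = to_bio_format_py_alt predictions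
instance (predictions : List (String × String)) (out : List (String × String)) : Decidable (Spec_to_bio_format_py predictions out) := by unfold Spec_to_bio_format_py; infer_instance

-- ===== CLAIM (what is proved, stated in full; the proofs are below) =====
def Claim_equal_to_bio_format_py : Prop := ∀ (predictions : List (String × String)), Dom_to_bio_format_py predictions → Spec_to_bio_format_py predictions (to_bio_format_py predictions)

-- ===== LEMMAS AND PROOFS =====

-- reference recursion: tag each token from the previous entity
def pvTag (prev : Option String) (e : String) : String :=
  if e = "OTHER" then "O" else (if prev = some e then "I" else "B") ++ "-" ++ PySem.Str.upper e

def pvRef : Option String → List (String × String) → List (String × String)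
  | _, [] => []
  | prev, (t, e) :: rest => (t, pvTag prev e) :: pvRef (some e) rest

theorem pvA_gen (suf : List (String × String)) : ∀ pre : List (String × String),
    (PySem.List.enumerate suf (pre.length : Int)).map
      (fun x => (x.2.1,
        if x.2.2 ≠ "OTHER" then
          (if x.1 > 0 ∧ (PySem.List.pyGet? (pre ++ suf) (x.1 - 1)).map Prod.snd = some x.2.2
            then "I" else "B") ++ "-" ++ PySem.Str.upper x.2.2
        else "O"))
    = pvRef ((pre.getLast?).map Prod.snd) suf := by
  induction suf with
  | nil => intro pre; simp [PySem.List.enumerate, pvRef]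
  | cons hd tl ih =>
    intro pre
    obtain ⟨t, e⟩ := hd
    rw [PySem.List.enumerate_cons, List.map_cons, pvRef]
    have htail := ih (pre ++ [(t, e)])
    have hlen : ((pre ++ [(t, e)]).length : Int) = (pre.length : Int) + 1 := by simp
    have happ : (pre ++ [(t, e)]) ++ tl = pre ++ (t, e) :: tl := by simp
    rw [hlen, happ] at htail
    rw [htail]
    have hlast : (pre ++ [(t, e)]).getLast? = some (t, e) := by simp
    rw [hlast]
    congr 1
    -- the head element
    simp only
    congr 1
    by_cases he : e = "OTHER"
    · simp [pvTag, he]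
    · have hcond : ((pre.length : Int) > 0 ∧
          (PySem.List.pyGet? (pre ++ (t, e) :: tl) ((pre.length : Int) - 1)).map Prod.snd = some e)
          ↔ (pre.getLast?.map Prod.snd = some e) := by
        cases hpre : pre.reverse with
        | nil =>
          have : pre = [] := by simpa using congrArg List.reverse hpre
          subst this; simp
        | cons p ps =>
          have hne : pre ≠ [] := by
            intro h; subst h; simp at hpre
          have hlen0 : 0 < pre.length := List.length_pos_of_ne_nil hne
          have hget : PySem.List.pyGet? (pre ++ (t, e) :: tl) ((pre.length : Int) - 1)
              = pre.getLast? := by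
            have hcast : ((pre.length : Int) - 1) = ((pre.length - 1 : Nat) : Int) := by
              omega
            rw [hcast, PySem.List.pyGet?_natCast]
            rw [List.getElem?_append_left (by omega)]
            rw [List.getLast?_eq_getElem?]
          rw [hget]
          constructor
          · rintro ⟨_, h⟩; exact h
          · intro h; exact ⟨by exact_mod_cast hlen0, h⟩
      simp only [pvTag, if_neg he, ne_eq, he, not_false_iff, if_true]
      by_cases hc : pre.getLast?.map Prod.snd = some e
      · rw [if_pos (hcond.mpr hc), if_pos hc]; simp
      · rw [if_neg (fun h => hc (hcond.mp h)), if_neg hc]; simp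

theorem pvA_eq_ref (predictions : List (String × String)) :
    to_bio_format_py predictions = pvRef none predictions := by
  unfold to_bio_format_py
  by_cases h : predictions.length > 0
  · rw [if_pos h]
    rw [PySem.List.foldl_append_singleton_eq_map]
    have := pvA_gen predictions []
    simpa using this
  · rw [if_neg h]
    have : predictions = [] := by
      cases predictions with
      | nil => rfl
      | cons a b => simp at h
    subst this; simp [pvRef]

theorem pvTakeRun_spec (e : String) (l : List (String × String)) :
    pvRef (some e) l =
      (pvTakeRun e l).1.map (fun t => (t, pvTag (some e) e)) ++ pvRef (some e) (pvTakeRun e l).2 := by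
  induction l with
  | nil => simp [pvTakeRun, pvRef]
  | cons x rest ih =>
    obtain ⟨t, e'⟩ := x
    by_cases h : e' = e
    · subst h
      simp only [pvTakeRun, if_pos rfl, pvRef]
      rw [ih]; simp
    · simp [pvTakeRun, h]

theorem pvTakeRun_snd_ne (e : String) (l : List (String × String)) :
    ∀ t' e' rest', (pvTakeRun e l).2 = (t', e') :: rest' → e' ≠ e := by
  induction l with
  | nil => intro t' e' rest' h; simp [pvTakeRun] at h
  | cons x rest ih =>
    obtain ⟨t, e0⟩ := x
    intro t' e' rest' h
    by_cases he : e0 = e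
    · exact ih t' e' rest' (by simpa [pvTakeRun, he] using h)
    · simp only [pvTakeRun, if_neg he] at h
      injection h with h1 h2
      injection h1 with h3 h4
      exact fun hc => he (h4 ▸ hc)

theorem pvB_gen : ∀ (n : Nat) (l : List (String × String)) (prev : Option String),
    l.length ≤ n → (∀ t e rest, l = (t, e) :: rest → prev ≠ some e) →
    pvRef prev l = (pvGroups l).flatMap pvRender := by
  intro n
  induction n with
  | zero =>
    intro l prev hlen _
    have : l = [] := List.length_eq_zero_iff.mp (Nat.le_zero.mp hlen)
    subst this; simp [pvRef, pvGroups]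
  | succ m ih =>
    intro l prev hlen hhead
    cases l with
    | nil => simp [pvRef, pvGroups]
    | cons x rest =>
      obtain ⟨t, e⟩ := x
      have hprev : prev ≠ some e := hhead t e rest rfl
      rw [pvGroups]
      rw [List.flatMap_cons]
      have hrest := pvTakeRun_spec e rest
      have hlen' : (pvTakeRun e rest).2.length ≤ m := by
        have := pvTakeRun_length_le e rest
        simp at hlen; omega
      have hih := ih (pvTakeRun e rest).2 (some e) hlen'
        (by intro t' e' rest' h hc
            exact pvTakeRun_snd_ne e rest t' e' rest' h (by injection hc with h'; exact h'.symm))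
      rw [pvRef, hrest, hih]
      congr 1
      -- (t, pvTag prev e) :: run.map … = pvRender (e, t :: run)
      by_cases he : e = "OTHER"
      · subst he
        simp [pvRender, pvTag]
      · simp only [pvRender, pvTag, if_neg he, he, not_false_iff]
        rw [if_neg hprev]
        rfl

-- ===== VERDICT (by name: the statement is the Claim_ definition above) =====
theorem to_bio_format_py_spec : Claim_equal_to_bio_format_py := by
  intro predictions _
  unfold Spec_to_bio_format_py to_bio_format_py_alt
  rw [pvA_eq_ref]
  exact pvB_gen predictions.length predictions none le_rfl (by intro _ _ _ h; simp)
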